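-- pv_equiv track=rewrite | github.com/ashwon13/Gridworld | RLDP.py | parseRwd
-- ===== SOURCE A (Python) =====
-- def parseRwd(BRTOptions,graph):
--     rwd=["R" in i for i in BRTOptions]
--     if True in rwd:
--         vtxRwd=0
--         for option in BRTOptions:
--             if "R" in option:
--                 if option[1:]!="":
--                     vtxRwd=int(option[1:])
--                 else:
--                     vtxRwd=graph["rwd"]
--         return vtxRwd
--     else:
--         return None
-- ===== SOURCE B (Python) =====
-- def parseRwd(BRTOptions, graph):
--     for option in reversed(BRTOptions):
--         if "R" in option:
--             suffix = option[1:]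
--             return int(suffix) if suffix != "" else graph["rwd"]
--     return None
-- ===== Notes on version B (the rewrite author's own statement) =====
-- stated objective: simpler
-- what changed: B replaces A's existence pre-scan plus full forward last-wins accumulation loop with a reverse scan that early-returns at the first (i.e. last) option containing 'R', never touching the other options.
import Mathlib
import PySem

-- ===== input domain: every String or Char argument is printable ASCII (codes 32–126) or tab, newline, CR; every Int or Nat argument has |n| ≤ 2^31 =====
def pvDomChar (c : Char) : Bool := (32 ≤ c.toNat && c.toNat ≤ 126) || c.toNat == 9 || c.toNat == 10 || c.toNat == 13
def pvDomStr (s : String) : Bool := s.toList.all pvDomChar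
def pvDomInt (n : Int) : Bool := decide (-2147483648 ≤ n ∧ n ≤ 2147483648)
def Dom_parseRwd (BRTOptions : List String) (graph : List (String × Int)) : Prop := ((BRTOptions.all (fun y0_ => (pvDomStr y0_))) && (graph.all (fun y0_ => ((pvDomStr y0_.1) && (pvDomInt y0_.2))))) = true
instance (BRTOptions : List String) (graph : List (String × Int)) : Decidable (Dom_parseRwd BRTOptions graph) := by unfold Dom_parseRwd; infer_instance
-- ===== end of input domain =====

-- ===== PORT A =====
-- header: B scans the options in reverse and early-returns at the first (= last) 'R' option (simpler); return value proved equal wherever A returns.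
def parseRwd (BRTOptions : List String) (graph : List (String × Int)) : Option Int :=
  let rwd := BRTOptions.map (fun i => PySem.Str.isIn "R" i)
  if rwd.contains true then
    BRTOptions.foldl (fun vtxRwd option =>
      match vtxRwd with
      | none => none   -- a prior step raised; unreachable under Pre_
      | some _ =>
        if PySem.Str.isIn "R" option then
          if PySem.Str.slice option (some 1) none ≠ "" then
            PySem.Int.ofStr? (PySem.Str.slice option (some 1) none)
          else (PySem.Dict.ofList graph).get? "rwd"
        else vtxRwd) (some (0 : Int))
  else none

-- ===== PORT B =====
-- B's loop over reversed(BRTOptions) with early return, as structural recursion on the reversed list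
def parseRwdRevLoop (graph : List (String × Int)) : List String → Option Int
  | [] => none
  | option :: rest =>
    if PySem.Str.isIn "R" option then
      if PySem.Str.slice option (some 1) none ≠ "" then
        PySem.Int.ofStr? (PySem.Str.slice option (some 1) none)
      else (PySem.Dict.ofList graph).get? "rwd"
    else parseRwdRevLoop graph rest

def parseRwd_alt (BRTOptions : List String) (graph : List (String × Int)) : Option Int :=
  parseRwdRevLoop graph BRTOptions.reverse

-- ===== PRECONDITION & SPEC =====
-- Pre_ excludes exactly the inputs where Python A raises: an option containing "R" whose suffix
-- option[1:] is non-empty but not int-parsable (ValueError), or is empty with no "rwd" key (KeyError).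
def Pre_parseRwd (BRTOptions : List String) (graph : List (String × Int)) : Prop :=
  ∀ option ∈ BRTOptions, PySem.Str.isIn "R" option = true →
    (if PySem.Str.slice option (some 1) none ≠ "" then
      (PySem.Int.ofStr? (PySem.Str.slice option (some 1) none)).isSome = true
     else ((PySem.Dict.ofList graph).get? "rwd").isSome = true)
instance (BRTOptions : List String) (graph : List (String × Int)) : Decidable (Pre_parseRwd BRTOptions graph) := by unfold Pre_parseRwd; infer_instance
def pvWitness_parseRwd : List String × (List (String × Int)) := (["R5", "x", "R"], [("rwd", 3)])

def Spec_parseRwd (BRTOptions : List String) (graph : List (String × Int)) (out : Option Int) : Prop := out = parseRwd_alt BRTOptions graph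
instance (BRTOptions : List String) (graph : List (String × Int)) (out : Option Int) : Decidable (Spec_parseRwd BRTOptions graph out) := by unfold Spec_parseRwd; infer_instance

-- ===== CLAIM (what is proved, stated in full; the proofs are below) =====
def Claim_equal_parseRwd : Prop := ∀ (BRTOptions : List String) (graph : List (String × Int)), Dom_parseRwd BRTOptions graph → Pre_parseRwd BRTOptions graph → Spec_parseRwd BRTOptions graph (parseRwd BRTOptions graph)

-- ===== LEMMAS AND PROOFS =====

-- the per-option value both programs compute on an R-option
def pvStep (graph : List (String × Int)) (option : String) : Option Int :=
  if PySem.Str.slice option (some 1) none ≠ "" then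
    PySem.Int.ofStr? (PySem.Str.slice option (some 1) none)
  else (PySem.Dict.ofList graph).get? "rwd"

def pvFoldA (graph : List (String × Int)) (l : List String) (acc : Option Int) : Option Int :=
  l.foldl (fun vtxRwd option =>
    match vtxRwd with
    | none => none
    | some _ => if PySem.Str.isIn "R" option then pvStep graph option else vtxRwd) acc

theorem pvStep_isSome {graph : List (String × Int)} {o : String}
    (h : if PySem.Str.slice o (some 1) none ≠ "" then
      (PySem.Int.ofStr? (PySem.Str.slice o (some 1) none)).isSome = true
     else ((PySem.Dict.ofList graph).get? "rwd").isSome = true) :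
    (pvStep graph o).isSome = true := by
  unfold pvStep
  split_ifs with hs
  · simpa [hs] using h
  · simpa [hs] using h

theorem pvRevLoop_step (graph : List (String × Int)) (o : String) (t : List String) :
    parseRwdRevLoop graph (o :: t) =
      if PySem.Str.isIn "R" o = true then pvStep graph o else parseRwdRevLoop graph t := rfl

theorem pvFoldA_append (graph : List (String × Int)) (l : List String) (o : String) (acc : Option Int) :
    pvFoldA graph (l ++ [o]) acc =
      match pvFoldA graph l acc with
      | none => none
      | some a => if PySem.Str.isIn "R" o = true then pvStep graph o else some a := by
  show List.foldl _ acc (l ++ [o]) = _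
  rw [List.foldl_append]
  show (match pvFoldA graph l acc with
    | none => none
    | some _ => if PySem.Str.isIn "R" o = true then pvStep graph o else pvFoldA graph l acc) = _
  cases h : pvFoldA graph l acc with
  | none => rfl
  | some a => rfl

-- main invariant: under Pre_, A's fold from any some-accumulator is B's reverse-scan answer when it found one, else the accumulator
theorem pvFoldA_eq_rev (graph : List (String × Int)) (l : List String)
    (hp : ∀ o ∈ l, PySem.Str.isIn "R" o = true →
      (if PySem.Str.slice o (some 1) none ≠ "" then
        (PySem.Int.ofStr? (PySem.Str.slice o (some 1) none)).isSome = true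
       else ((PySem.Dict.ofList graph).get? "rwd").isSome = true)) :
    ∀ a : Int, pvFoldA graph l (some a) =
      match parseRwdRevLoop graph l.reverse with
      | none => some a
      | some v => some v := by
  induction l using List.reverseRecOn with
  | nil => intro a; rfl
  | append_singleton t o ih =>
    intro a
    have hp' : ∀ x ∈ t, _ := fun x hx => hp x (by simp [hx])
    rw [pvFoldA_append, ih hp', List.reverse_append]
    simp only [List.reverse_singleton, List.singleton_append, pvRevLoop_step]
    by_cases hR : PySem.Str.isIn "R" o = true
    · have hs := pvStep_isSome (hp o (by simp) hR)
      obtain ⟨k, hk⟩ := Option.isSome_iff_exists.mp hs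
      have hR' : PySem.Chars.isIn ['R'] o.toList = true := hR
      rw [hk]
      cases parseRwdRevLoop graph t.reverse <;> simp [hR']
    · have hR' : ¬ PySem.Chars.isIn ['R'] o.toList = true := hR
      cases parseRwdRevLoop graph t.reverse <;> simp [hR']

theorem pvRevLoop_none_of_no_R (graph : List (String × Int)) (l : List String)
    (h : ∀ o ∈ l, ¬ PySem.Str.isIn "R" o = true) : parseRwdRevLoop graph l = none := by
  induction l with
  | nil => rfl
  | cons o t ih =>
    rw [pvRevLoop_step, if_neg (h o (by simp))]
    exact ih (fun x hx => h x (by simp [hx]))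

theorem pvRevLoop_isSome (graph : List (String × Int)) (l : List String)
    (hp : ∀ o ∈ l, PySem.Str.isIn "R" o = true →
      (if PySem.Str.slice o (some 1) none ≠ "" then
        (PySem.Int.ofStr? (PySem.Str.slice o (some 1) none)).isSome = true
       else ((PySem.Dict.ofList graph).get? "rwd").isSome = true))
    (hR : ∃ o ∈ l, PySem.Str.isIn "R" o = true) :
    (parseRwdRevLoop graph l).isSome = true := by
  induction l with
  | nil => simp at hR
  | cons x t ih =>
    rw [pvRevLoop_step]
    by_cases hx : PySem.Str.isIn "R" x = true
    · rw [if_pos hx]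
      exact pvStep_isSome (hp x (by simp) hx)
    · rw [if_neg hx]
      obtain ⟨o, ho, hoR⟩ := hR
      rcases List.mem_cons.mp ho with h | h
      · subst h; exact absurd hoR hx
      · exact ih (fun y hy => hp y (by simp [hy])) ⟨o, h, hoR⟩

-- ===== VERDICT (by name: the statement is the Claim_ definition above) =====
theorem parseRwd_spec : Claim_equal_parseRwd := by
  intro BRTOptions graph _ hpre
  unfold Spec_parseRwd parseRwd_alt
  show (if (BRTOptions.map (fun i => PySem.Str.isIn "R" i)).contains true = true
      then pvFoldA graph BRTOptions (some 0) else none)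
      = parseRwdRevLoop graph BRTOptions.reverse
  by_cases hR : ∃ o ∈ BRTOptions, PySem.Str.isIn "R" o = true
  · have hguard : (BRTOptions.map (fun i => PySem.Str.isIn "R" i)).contains true = true := by
      obtain ⟨o, ho, hoR⟩ := hR
      exact List.contains_iff_mem.mpr (List.mem_map.mpr ⟨o, ho, hoR⟩)
    have hrp : ∀ o ∈ BRTOptions.reverse, PySem.Str.isIn "R" o = true → _ :=
      fun o ho => hpre o (by simpa using ho)
    have hs := pvRevLoop_isSome graph BRTOptions.reverse hrp
      (by obtain ⟨o, ho, hoR⟩ := hR; exact ⟨o, by simpa using ho, hoR⟩)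
    obtain ⟨v, hv⟩ := Option.isSome_iff_exists.mp hs
    rw [if_pos hguard, pvFoldA_eq_rev graph BRTOptions hpre 0, hv]
  · have hguard : ¬ (BRTOptions.map (fun i => PySem.Str.isIn "R" i)).contains true = true := by
      intro hc
      obtain ⟨o, ho, hoR⟩ := List.mem_map.mp (List.contains_iff_mem.mp hc)
      exact hR ⟨o, ho, hoR⟩
    rw [if_neg hguard, pvRevLoop_none_of_no_R graph BRTOptions.reverse
      (fun o ho h => hR ⟨o, by simpa using ho, h⟩)]
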